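-- pv_equiv track=rewrite | github.com/CrushFxl/FormSubmission-Tool-based-on-wjx | task-server/server/src/wjx.py | dataenc
-- ===== SOURCE A (Python) =====
-- def dataenc(jqnonce, ktimes):
--     b = ktimes % 10
--     if b == 0:
--         b = 1
--     c = []
--     for char in jqnonce:
--         e = ord(char) ^ b
--         c.append(chr(e))
--     return ''.join(c)
-- ===== SOURCE B (Python) =====
-- def dataenc(jqnonce, ktimes):
--     b = (ktimes % 10) or 1
--     table = {ord(ch): ord(ch) ^ b for ch in set(jqnonce)}
--     return jqnonce.translate(table)
-- ===== Notes on version B (the rewrite author's own statement) =====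
-- stated objective: idiomatic
-- what changed: B precomputes a translation table over the distinct characters (set(jqnonce)) and delegates the per-character pass to str.translate, instead of A's explicit loop appending chr(ord(c)^b) to a list.
import Mathlib
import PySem

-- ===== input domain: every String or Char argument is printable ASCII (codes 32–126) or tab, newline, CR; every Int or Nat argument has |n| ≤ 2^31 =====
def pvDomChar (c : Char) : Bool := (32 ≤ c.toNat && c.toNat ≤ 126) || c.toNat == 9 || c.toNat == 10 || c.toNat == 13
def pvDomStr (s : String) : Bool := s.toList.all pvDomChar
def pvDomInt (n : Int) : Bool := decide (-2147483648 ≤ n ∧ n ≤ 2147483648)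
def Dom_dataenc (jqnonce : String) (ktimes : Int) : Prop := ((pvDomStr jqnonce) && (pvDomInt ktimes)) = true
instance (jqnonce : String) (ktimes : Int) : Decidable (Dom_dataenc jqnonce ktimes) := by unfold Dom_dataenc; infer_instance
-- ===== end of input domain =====

-- B replaces A's explicit append loop by a precomputed translation table over the
-- distinct characters plus str.translate (idiomatic; same O(n) cost).


-- ===== PORT A =====
-- b = ktimes % 10; if b == 0: b = 1; loop appending chr(ord(char) ^ b)
def dataenc (jqnonce : String) (ktimes : Int) : String :=
  let b0 := PySem.Int.mod ktimes 10
  let b := if b0 = 0 then 1 else b0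
  let c := jqnonce.toList.foldl
    (fun c char => c ++ [Char.ofNat (PySem.Int.bxor (char.toNat : Int) b).toNat]) []
  String.ofList c

-- ===== PORT B =====
-- b = (ktimes % 10) or 1; table = {ord(ch): ord(ch) ^ b for ch in set(jqnonce)};
-- jqnonce.translate(table)  — translate with an int→int table maps each char whose
-- ordinal is a key to chr(table[ord]) and keeps other chars (ported by hand, exact here
-- since all values are in-range ints).
def dataenc_alt (jqnonce : String) (ktimes : Int) : String :=
  let b := if PySem.Int.mod ktimes 10 = 0 then 1 else PySem.Int.mod ktimes 10
  let table : PySem.Dict Int Int :=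
    (PySem.Set.ofList jqnonce.toList).foldl
      (fun d ch => d.insert (ch.toNat : Int) (PySem.Int.bxor (ch.toNat : Int) b))
      PySem.Dict.empty
  String.ofList (jqnonce.toList.map (fun ch =>
    match table.get? (ch.toNat : Int) with
    | some v => Char.ofNat v.toNat
    | none => ch))

-- ===== PRECONDITION & SPEC =====
def Spec_dataenc (jqnonce : String) (ktimes : Int) (out : String) : Prop := out = dataenc_alt jqnonce ktimes
instance (jqnonce : String) (ktimes : Int) (out : String) : Decidable (Spec_dataenc jqnonce ktimes out) := by unfold Spec_dataenc; infer_instance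

-- ===== CLAIM (what is proved, stated in full; the proofs are below) =====
def Claim_equal_dataenc : Prop := ∀ (jqnonce : String) (ktimes : Int), Dom_dataenc jqnonce ktimes → Spec_dataenc jqnonce ktimes (dataenc jqnonce ktimes)

-- ===== LEMMAS AND PROOFS =====

-- A's append loop is map.
theorem pv_foldl_append_map (l : List Char) (f : Char → Char) (acc : List Char) :
    l.foldl (fun c ch => c ++ [f ch]) acc = acc ++ l.map f := by
  induction l generalizing acc with
  | nil => simp
  | cons h t ih => simp [List.foldl, ih, List.append_assoc]

-- Lookup in the table built by inserting (ord ch, ord ch ^ b) over a char list.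
theorem pv_table_get? (L : List Char) (d : PySem.Dict Int Int) (b : Int) (x : Char) :
    (L.foldl (fun d ch => d.insert (ch.toNat : Int) (PySem.Int.bxor (ch.toNat : Int) b)) d).get?
        (x.toNat : Int)
      = if (x.toNat : Int) ∈ L.map (fun ch => (ch.toNat : Int))
        then some (PySem.Int.bxor (x.toNat : Int) b)
        else d.get? (x.toNat : Int) := by
  induction L generalizing d with
  | nil => simp
  | cons h t ih =>
    simp only [List.foldl, List.map, List.mem_cons, ih]
    by_cases hm : (x.toNat : Int) ∈ t.map (fun ch => (ch.toNat : Int))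
    · simp [hm]
    · by_cases he : (x.toNat : Int) = (h.toNat : Int)
      · simp [he]
      · simp [hm, he, PySem.Dict.get?_insert]

theorem dataenc_eq (jqnonce : String) (ktimes : Int) :
    dataenc jqnonce ktimes = dataenc_alt jqnonce ktimes := by
  unfold dataenc dataenc_alt
  simp only [pv_foldl_append_map, List.nil_append]
  congr 1
  apply List.map_congr_left
  intro ch hch
  rw [pv_table_get?]
  have hmem : (ch.toNat : Int) ∈ (PySem.Set.ofList jqnonce.toList).map (fun c => (c.toNat : Int)) :=
    List.mem_map_of_mem ((PySem.Set.mem_ofList _ _).2 hch)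
  simp [hmem]

-- ===== VERDICT (by name: the statement is the Claim_ definition above) =====
theorem dataenc_spec : Claim_equal_dataenc := by
  intro jqnonce ktimes _
  exact dataenc_eq jqnonce ktimes
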